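-- pv_equiv track=rewrite | github.com/dkemf10004-sketch/YongJe | tools/build_relation_matrices.py | pick_relation_source
-- ===== SOURCE A (Python) =====
-- SOURCE_PRIORITY = [
--     'legendWith',
--     'legendHard',
--     'pairLift',
--     'packageLift',
--     'weakHint',
--     'reverseWeakHint',
--     'banPressure',
-- ]
--
-- def pick_relation_source(entry: dict) -> str:
--     sources = entry.get('sources') or {}
--     for key in SOURCE_PRIORITY:
--         if sources.get(key):
--             return key
--     if sources:
--         return sorted(sources.keys())[0]
--     return 'matrix'
-- ===== SOURCE B (Python) =====
-- SOURCE_PRIORITY = [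
--     'legendWith',
--     'legendHard',
--     'pairLift',
--     'packageLift',
--     'weakHint',
--     'reverseWeakHint',
--     'banPressure',
-- ]
--
-- def pick_relation_source(entry: dict) -> str:
--     rank = {k: i for i, k in enumerate(SOURCE_PRIORITY)}
--     sources = entry.get('sources') or {}
--     best = None
--     for k, v in sources.items():
--         r = rank.get(k)
--         if v and r is not None and (best is None or r < best[0]):
--             best = (r, k)
--     if best is not None:
--         return best[1]
--     if sources:
--         return min(sources)
--     return 'matrix'
-- ===== Notes on version B (the rewrite author's own statement) =====
-- stated objective: alternative
-- what changed: A scans the fixed priority list doing a sources lookup per priority key and falls back to the first element of the sorted key list; B builds a rank table once, makes a single pass over sources keeping the minimum-rank truthy key, and falls back to the minimum key.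
import Mathlib
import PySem

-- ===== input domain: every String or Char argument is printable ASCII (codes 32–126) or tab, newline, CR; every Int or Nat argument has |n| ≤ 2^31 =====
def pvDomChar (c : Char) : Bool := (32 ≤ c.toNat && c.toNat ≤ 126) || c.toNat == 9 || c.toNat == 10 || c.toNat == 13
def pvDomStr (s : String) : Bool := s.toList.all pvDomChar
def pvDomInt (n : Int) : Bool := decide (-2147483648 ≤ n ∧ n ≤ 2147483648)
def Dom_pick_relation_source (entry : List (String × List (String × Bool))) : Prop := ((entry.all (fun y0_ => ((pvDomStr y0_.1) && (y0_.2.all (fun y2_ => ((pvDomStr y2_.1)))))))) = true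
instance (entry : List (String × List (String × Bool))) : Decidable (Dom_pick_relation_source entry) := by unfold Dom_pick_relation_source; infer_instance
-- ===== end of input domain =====

-- B replaces A's priority-ordered scan with lookups into sources by a single pass over
-- sources selecting the minimum-rank truthy key via a rank table (objective: alternative).

-- module constant SOURCE_PRIORITY (shared by both Python sources)
def srcPriority : List String :=
  ["legendWith", "legendHard", "pairLift", "packageLift", "weakHint", "reverseWeakHint", "banPressure"]

-- ===== PORT A =====
-- 'for key in SOURCE_PRIORITY: if sources.get(key): return key'
def pickLoop (sources : List (String × Bool)) : List String → Option String
  | [] => none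
  | k :: rest =>
      if ((PySem.Dict.mk sources).get? k).getD false then some k
      else pickLoop sources rest

def pick_relation_source (entry : List (String × List (String × Bool))) : String :=
  let sources := ((PySem.Dict.mk entry).get? "sources").getD []
  match pickLoop sources srcPriority with
  | some k => k
  | none =>
      if !sources.isEmpty then
        -- sorted(sources.keys())[0]; the [] branch is unreachable (sources is non-empty here)
        match PySem.List.sorted (sources.map Prod.fst) (fun x => x) false with
        | m :: _ => m
        | [] => "matrix"
      else "matrix"

-- ===== PORT B =====
-- rank = {k: i for i, k in enumerate(SOURCE_PRIORITY)}
def rankTable : PySem.Dict String Int :=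
  PySem.Dict.ofList ((PySem.List.enumerate srcPriority).map (fun p => (p.2, p.1)))

-- loop body: r = rank.get(k); if v and r is not None and (best is None or r < best[0]): best = (r, k)
def bestStep (best : Option (Int × String)) (kv : String × Bool) : Option (Int × String) :=
  match rankTable.get? kv.1 with
  | none => best
  | some r =>
      if kv.2 && (match best with | none => true | some (br, _) => decide (r < br)) then
        some (r, kv.1)
      else best

def pick_relation_source_alt (entry : List (String × List (String × Bool))) : String :=
  let sources := ((PySem.Dict.mk entry).get? "sources").getD []
  match sources.foldl bestStep none with
  | some (_, k) => k
  | none =>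
      if !sources.isEmpty then
        -- min(sources); the none branch is unreachable (sources is non-empty here)
        match PySem.List.min? (sources.map Prod.fst) (fun x => x) with
        | some m => m
        | none => "matrix"
      else "matrix"

-- ===== PRECONDITION & SPEC =====
-- Pre_ excludes association lists whose 'sources' value carries duplicate keys: those denote no
-- Python dict at all (dict keys are unique), and A's first-match lookup vs B's full-pass scan
-- are both accidental readings of such a list.
def Pre_pick_relation_source (entry : List (String × List (String × Bool))) : Prop :=
  (((((PySem.Dict.mk entry).get? "sources").getD []).map Prod.fst)).Nodup
instance (entry : List (String × List (String × Bool))) : Decidable (Pre_pick_relation_source entry) := by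
  unfold Pre_pick_relation_source; infer_instance

def pvWitness_pick_relation_source : (List (String × List (String × Bool))) :=
  [("sources", [("aaa", false), ("pairLift", true)])]

def Spec_pick_relation_source (entry : List (String × List (String × Bool))) (out : String) : Prop := out = pick_relation_source_alt entry
instance (entry : List (String × List (String × Bool))) (out : String) : Decidable (Spec_pick_relation_source entry out) := by unfold Spec_pick_relation_source; infer_instance

-- ===== CLAIM (what is proved, stated in full; the proofs are below) =====
def Claim_equal_pick_relation_source : Prop := ∀ (entry : List (String × List (String × Bool))), Dom_pick_relation_source entry → Pre_pick_relation_source entry → Spec_pick_relation_source entry (pick_relation_source entry)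

-- ===== LEMMAS AND PROOFS =====

-- the candidate a single sources item contributes in B's loop
def cand (kv : String × Bool) : Option (Int × String) :=
  match rankTable.get? kv.1 with
  | none => none
  | some r => if kv.2 then some (r, kv.1) else none

-- min-rank combination, left wins ties
def comb (a b : Option (Int × String)) : Option (Int × String) :=
  match b with
  | none => a
  | some (rb, kb) =>
      match a with
      | none => some (rb, kb)
      | some (ra, ka) => if rb < ra then some (rb, kb) else some (ra, ka)

lemma bestStep_eq_comb (a : Option (Int × String)) (kv : String × Bool) :
    bestStep a kv = comb a (cand kv) := by
  unfold bestStep cand comb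
  rcases kv with ⟨k, v⟩
  cases h : rankTable.get? k <;> cases v <;> rcases a with _ | ⟨br, kb⟩ <;> simp <;>
    rename_i r <;> by_cases hlt : r < br <;> simp [hlt]

lemma comb_none_left (b : Option (Int × String)) : comb none b = b := by
  cases b with
  | none => rfl
  | some p => rcases p with ⟨r, k⟩; rfl

lemma comb_none_right (a : Option (Int × String)) : comb a none = a := rfl

lemma comb_some_some (ra rb : Int) (ka kb : String) :
    comb (some (ra, ka)) (some (rb, kb)) = if rb < ra then some (rb, kb) else some (ra, ka) := rfl

lemma comb_assoc (a b c : Option (Int × String)) :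
    comb (comb a b) c = comb a (comb b c) := by
  rcases a with _ | ⟨ra, ka⟩ <;> rcases b with _ | ⟨rb, kb⟩ <;> rcases c with _ | ⟨rc, kc⟩ <;>
    try rfl
  all_goals (try simp only [comb_none_left, comb_some_some])
  all_goals (try split_ifs)
  all_goals (try simp only [comb_none_right, comb_some_some])
  all_goals (try split_ifs)
  all_goals first | rfl | omega

lemma foldl_bestStep_eq (s : List (String × Bool)) :
    ∀ a, s.foldl bestStep a = comb a (s.foldl bestStep none) := by
  induction s with
  | nil => intro a; simp [List.foldl, comb_none_right]
  | cons kv t ih =>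
      intro a
      simp only [List.foldl]
      rw [ih (bestStep a kv), ih (bestStep none kv),
          bestStep_eq_comb a kv, bestStep_eq_comb none kv, comb_none_left, comb_assoc]

-- characterisation of B's loop result
lemma foldl_char (s : List (String × Bool)) :
    (s.foldl bestStep none = none ∧ ∀ kv ∈ s, cand kv = none) ∨
    (∃ r k, s.foldl bestStep none = some (r, k) ∧ (∃ kv ∈ s, cand kv = some (r, k)) ∧
      ∀ kv ∈ s, ∀ r' k', cand kv = some (r', k') → r ≤ r') := by
  induction s with
  | nil => left; simp [List.foldl]
  | cons kv t ih =>
      have hstep : (kv :: t).foldl bestStep none = comb (cand kv) (t.foldl bestStep none) := by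
        simp only [List.foldl]
        rw [foldl_bestStep_eq, bestStep_eq_comb none kv, comb_none_left]
      rcases ih with ⟨hnone, hall⟩ | ⟨r, k, heq, ⟨kv', hkv', hc'⟩, hmin⟩
      · cases hc : cand kv with
        | none =>
            left
            refine ⟨by rw [hstep, hc, hnone]; rfl, ?_⟩
            intro x hx
            rcases List.mem_cons.mp hx with hx | hx
            · rw [hx]; exact hc
            · exact hall x hx
        | some p =>
            right
            rcases p with ⟨r, k⟩
            refine ⟨r, k, ?_, ⟨kv, List.mem_cons_self, hc⟩, ?_⟩
            · rw [hstep, hc, hnone]; rfl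
            · intro x hx r' k' hx'
              rcases List.mem_cons.mp hx with hx | hx
              · rw [hx, hc] at hx'; injection hx' with h; injection h with h1 _; omega
              · rw [hall x hx] at hx'; cases hx'
      · cases hc : cand kv with
        | none =>
            right
            refine ⟨r, k, by rw [hstep, hc, comb_none_left, heq],
              ⟨kv', List.mem_cons_of_mem _ hkv', hc'⟩, ?_⟩
            intro x hx r' k' hx'
            rcases List.mem_cons.mp hx with hx | hx
            · rw [hx, hc] at hx'; cases hx'
            · exact hmin x hx r' k' hx'
        | some p =>
            rcases p with ⟨rc, kc⟩
            right
            by_cases hlt : r < rc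
            · refine ⟨r, k, ?_, ⟨kv', List.mem_cons_of_mem _ hkv', hc'⟩, ?_⟩
              · rw [hstep, hc, heq]; unfold comb; simp only; rw [if_pos (by omega)]
              · intro x hx r' k' hx'
                rcases List.mem_cons.mp hx with hx | hx
                · rw [hx, hc] at hx'; injection hx' with h; injection h with h1 _; omega
                · exact hmin x hx r' k' hx'
            · refine ⟨rc, kc, ?_, ⟨kv, List.mem_cons_self, hc⟩, ?_⟩
              · rw [hstep, hc, heq]; unfold comb; simp only; rw [if_neg (by omega)]
              · intro x hx r' k' hx'
                rcases List.mem_cons.mp hx with hx | hx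
                · rw [hx, hc] at hx'; injection hx' with h; injection h with h1 _; omega
                · have := hmin x hx r' k' hx'; omega

-- the rank table, spelled out
lemma rankTable_eq : rankTable = PySem.Dict.mk
    [("legendWith", 0), ("legendHard", 1), ("pairLift", 2), ("packageLift", 3),
     ("weakHint", 4), ("reverseWeakHint", 5), ("banPressure", 6)] := by
  decide

lemma rank_cases {k : String} {r : Int} (h : rankTable.get? k = some r) :
    (k = "legendWith" ∧ r = 0) ∨ (k = "legendHard" ∧ r = 1) ∨ (k = "pairLift" ∧ r = 2) ∨
    (k = "packageLift" ∧ r = 3) ∨ (k = "weakHint" ∧ r = 4) ∨ (k = "reverseWeakHint" ∧ r = 5) ∨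
    (k = "banPressure" ∧ r = 6) := by
  rw [rankTable_eq] at h
  simp only [PySem.Dict.get?_mk_cons, beq_iff_eq] at h
  split_ifs at h with h1 h2 h3 h4 h5 h6 h7
  · exact Or.inl ⟨h1.symm, by injection h with h'; omega⟩
  · exact Or.inr (Or.inl ⟨h2.symm, by injection h with h'; omega⟩)
  · exact Or.inr (Or.inr (Or.inl ⟨h3.symm, by injection h with h'; omega⟩))
  · exact Or.inr (Or.inr (Or.inr (Or.inl ⟨h4.symm, by injection h with h'; omega⟩)))
  · exact Or.inr (Or.inr (Or.inr (Or.inr (Or.inl ⟨h5.symm, by injection h with h'; omega⟩))))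
  · exact Or.inr (Or.inr (Or.inr (Or.inr (Or.inr (Or.inl ⟨h6.symm, by injection h with h'; omega⟩)))))
  · exact Or.inr (Or.inr (Or.inr (Or.inr (Or.inr (Or.inr ⟨h7.symm, by injection h with h'; omega⟩)))))
  · exact absurd h (by simp [PySem.Dict.get?])

lemma rank_of_mem {k : String} (h : k ∈ srcPriority) : ∃ r, rankTable.get? k = some r := by
  simp only [srcPriority, List.mem_cons, List.not_mem_nil, or_false] at h
  rcases h with h | h | h | h | h | h | h <;> subst h
  · exact ⟨0, by decide⟩
  · exact ⟨1, by decide⟩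
  · exact ⟨2, by decide⟩
  · exact ⟨3, by decide⟩
  · exact ⟨4, by decide⟩
  · exact ⟨5, by decide⟩
  · exact ⟨6, by decide⟩

-- A's loop is find? over the priority list
lemma pickLoop_eq_find? (s : List (String × Bool)) (l : List String) :
    pickLoop s l = l.find? (fun k => ((PySem.Dict.mk s).get? k).getD false) := by
  induction l with
  | nil => rfl
  | cons k rest ih =>
      unfold pickLoop
      by_cases h : ((PySem.Dict.mk s).get? k).getD false = true <;>
        simp [List.find?, h, ih]

-- under unique keys, A's truthiness test is membership of (k, true)
lemma pred_eq (s : List (String × Bool)) (hnd : (s.map Prod.fst).Nodup) (k : String) :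
    ((PySem.Dict.mk s).get? k).getD false = decide ((k, true) ∈ s) := by
  have hkeys : (PySem.Dict.mk s).keys.Nodup := hnd
  by_cases hm : (k, true) ∈ s
  · have : (PySem.Dict.mk s).get? k = some true :=
      PySem.Dict.get?_of_mem_items (d := PySem.Dict.mk s) hm hkeys
    simp [this, hm]
  · cases hg : (PySem.Dict.mk s).get? k with
    | none => simp [hm]
    | some v =>
        have hmem : (k, v) ∈ s := PySem.Dict.mem_items_of_get?_eq_some (d := PySem.Dict.mk s) hg
        cases v
        · simp [hm]
        · exact absurd hmem hm

-- cand of a priority-membership witness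
lemma cand_of_mem_true {k : String} {r : Int}
    (hr : rankTable.get? k = some r) : cand (k, true) = some (r, k) := by
  unfold cand; rw [hr]; rfl

-- glue, phase 1: B's loop result and A's find? agree on the chosen key
lemma phase1_eq (s : List (String × Bool)) (hnd : (s.map Prod.fst).Nodup) :
    (match s.foldl bestStep none with | some (_, k) => some k | none => none) =
      srcPriority.find? (fun k => ((PySem.Dict.mk s).get? k).getD false) := by
  have hpred : (fun k => ((PySem.Dict.mk s).get? k).getD false) =
      (fun k => decide ((k, true) ∈ s)) := funext (pred_eq s hnd)
  rw [hpred]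
  rcases foldl_char s with ⟨hnone, hall⟩ | ⟨r, k, heq, ⟨kv, hkv, hc⟩, hmin⟩
  · rw [hnone]
    symm
    rw [List.find?_eq_none]
    intro x hx
    simp only [decide_eq_true_eq]
    intro hmem
    obtain ⟨rx, hrx⟩ := rank_of_mem hx
    have := hall (x, true) hmem
    rw [cand_of_mem_true hrx] at this
    cases this
  · rw [heq]
    -- unpack the candidate: kv = (k, true) with rankTable.get? k = some r
    have hkvshape : kv.2 = true ∧ kv.1 = k ∧ rankTable.get? kv.1 = some r := by
      unfold cand at hc
      cases hg : rankTable.get? kv.1 with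
      | none => rw [hg] at hc; cases hc
      | some r0 =>
          rw [hg] at hc
          cases hv : kv.2 <;> rw [hv] at hc
          · cases hc
          · injection hc with h; injection h with h1 h2
            exact ⟨rfl, h2, congrArg some h1⟩
    obtain ⟨hv, hk1, hrk⟩ := hkvshape
    rw [hk1] at hrk
    have hmem : (k, true) ∈ s := by
      have : kv = (k, true) := by rcases kv with ⟨a, b⟩; simp_all
      exact this ▸ hkv
    -- no priority key of strictly smaller rank is a truthy member
    have hnotlt : ∀ (k' : String) (r' : Int), rankTable.get? k' = some r' → r' < r →
        ¬ ((k', true) ∈ s) := by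
      intro k' r' hr' hlt hmem'
      have := hmin (k', true) hmem' r' k' (cand_of_mem_true hr')
      omega
    rcases rank_cases hrk with ⟨hkk, hrr⟩ | ⟨hkk, hrr⟩ | ⟨hkk, hrr⟩ | ⟨hkk, hrr⟩ |
      ⟨hkk, hrr⟩ | ⟨hkk, hrr⟩ | ⟨hkk, hrr⟩ <;> subst hkk <;> subst hrr
    · simp [srcPriority, List.find?, hmem]
    · simp [srcPriority, List.find?, hmem,
        hnotlt "legendWith" 0 (by decide) (by omega)]
    · simp [srcPriority, List.find?, hmem,
        hnotlt "legendWith" 0 (by decide) (by omega),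
        hnotlt "legendHard" 1 (by decide) (by omega)]
    · simp [srcPriority, List.find?, hmem,
        hnotlt "legendWith" 0 (by decide) (by omega),
        hnotlt "legendHard" 1 (by decide) (by omega),
        hnotlt "pairLift" 2 (by decide) (by omega)]
    · simp [srcPriority, List.find?, hmem,
        hnotlt "legendWith" 0 (by decide) (by omega),
        hnotlt "legendHard" 1 (by decide) (by omega),
        hnotlt "pairLift" 2 (by decide) (by omega),
        hnotlt "packageLift" 3 (by decide) (by omega)]
    · simp [srcPriority, List.find?, hmem,
        hnotlt "legendWith" 0 (by decide) (by omega),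
        hnotlt "legendHard" 1 (by decide) (by omega),
        hnotlt "pairLift" 2 (by decide) (by omega),
        hnotlt "packageLift" 3 (by decide) (by omega),
        hnotlt "weakHint" 4 (by decide) (by omega)]
    · simp [srcPriority, List.find?, hmem,
        hnotlt "legendWith" 0 (by decide) (by omega),
        hnotlt "legendHard" 1 (by decide) (by omega),
        hnotlt "pairLift" 2 (by decide) (by omega),
        hnotlt "packageLift" 3 (by decide) (by omega),
        hnotlt "weakHint" 4 (by decide) (by omega),
        hnotlt "reverseWeakHint" 5 (by decide) (by omega)]

-- glue, phase 2: head of sorted = min (both are THE least string, unique by antisymmetry)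
lemma fallback_eq (xs : List String) (h : xs ≠ []) :
    (match PySem.List.sorted xs (fun x => x) false with | m :: _ => m | [] => "matrix") =
      (match PySem.List.min? xs (fun x => x) with | some m => m | none => "matrix") := by
  cases hs : PySem.List.sorted xs (fun x => x) false with
  | nil => exact absurd (((PySem.List.sorted_eq_nil_iff xs (fun x => x) false).mp hs)) h
  | cons m t =>
      cases hm : PySem.List.min? xs (fun x => x) with
      | none => exact absurd (((PySem.List.min?_eq_none_iff xs (fun x => x)).mp hm)) h
      | some m' =>
          have hmem : m ∈ xs := by
            rw [← PySem.List.mem_sorted (key := fun x => x) (rev := false), hs]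
            exact List.mem_cons_self
          have hmle : ∀ y ∈ xs, m ≤ y := PySem.List.key_head_sorted_le xs (fun x => x) hs
          have hm'mem : m' ∈ xs := PySem.List.min?_mem hm
          have hm'le : ∀ y ∈ xs, m' ≤ y := PySem.List.min?_isMin hm
          exact le_antisymm (hmle m' hm'mem) (hm'le m hmem)

-- ===== VERDICT (by name: the statement is the Claim_ definition above) =====
theorem pick_relation_source_spec : Claim_equal_pick_relation_source := by
  intro entry _ hpre
  unfold Spec_pick_relation_source pick_relation_source pick_relation_source_alt
  have hnd : ((((PySem.Dict.mk entry).get? "sources").getD []).map Prod.fst).Nodup := hpre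
  set s := ((PySem.Dict.mk entry).get? "sources").getD [] with hsdef
  have h1 := phase1_eq s hnd
  show (match pickLoop s srcPriority with
        | some k => k
        | none =>
            if !s.isEmpty then
              match PySem.List.sorted (s.map Prod.fst) (fun x => x) false with
              | m :: _ => m
              | [] => "matrix"
            else "matrix")
      = (match s.foldl bestStep none with
        | some (_, k) => k
        | none =>
            if !s.isEmpty then
              match PySem.List.min? (s.map Prod.fst) (fun x => x) with
              | some m => m
              | none => "matrix"
            else "matrix")
  rw [pickLoop_eq_find?, ← h1]
  cases hf : s.foldl bestStep none with
  | some p => rcases p with ⟨r, k⟩; simp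
  | none =>
      simp only
      by_cases he : s.isEmpty
      · simp [he]
      · simp only [he, Bool.not_false, if_true]
        exact fallback_eq (s.map Prod.fst) (by
          intro hc
          exact he (by simpa [List.isEmpty_iff, List.map_eq_nil_iff] using hc))
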